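-- pv_equiv track=rewrite | github.com/hwamoc/algorithm-study | rlaclgh/lv3_예산.py | solution
-- ===== SOURCE A (Python) =====
-- def solution(budgets, M):
--     budgets.sort()
--     if budgets[0] * len(budgets) > M:
--         return M // len(budgets)
--     if sum(budgets) <= M:
--         return max(budgets)
--     else:
--         length =  len(budgets)
--
--         lt  , rt = 0 , length -1
--         while rt - lt != 1 :
--             mid = (lt+rt) //2
--             # 올려야되
--             if sum(budgets[:mid]) + budgets[mid]*(length-mid) <M :
--                 lt = mid
--             elif sum(budgets[:mid]) + budgets[mid]*(length-mid) >M :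
--                 rt = mid
--             else:
--                 return budgets[mid]
--
--         M -= sum(budgets[:rt])
--         return M //(length-rt)
--
--
-- #         new_lt  , new_rt = budgets[lt] , budgets[rt]
-- #         while new_lt new_rt:
-- #             new_mid = (new_rt+new_lt)//2
-- #             if sum(budgets[:rt]) + new_mid * (length- rt) <M:
-- #                 new_lt = new_mid
-- #             else:
-- #                 new_rt = new_mid
--
--
--
--     return rt
-- ===== SOURCE B (Python) =====
-- def solution(budgets, M):
--     # single accumulating linear pass over the sorted list (mutates budgets in place like A)
--     budgets.sort()
--     total = M
--     rem = len(budgets)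
--     for b in budgets:
--         if b * rem > total:
--             return total // rem
--         total -= b
--         rem -= 1
--     return budgets[-1]
-- ===== Notes on version B (the rewrite author's own statement) =====
-- stated objective: simpler
-- what changed: Replaced A's index binary search (each step re-summing a prefix slice) plus separate first-element/all-fit special cases by one accumulating linear pass over the sorted list that maintains the remaining budget and remaining count.
import Mathlib
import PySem

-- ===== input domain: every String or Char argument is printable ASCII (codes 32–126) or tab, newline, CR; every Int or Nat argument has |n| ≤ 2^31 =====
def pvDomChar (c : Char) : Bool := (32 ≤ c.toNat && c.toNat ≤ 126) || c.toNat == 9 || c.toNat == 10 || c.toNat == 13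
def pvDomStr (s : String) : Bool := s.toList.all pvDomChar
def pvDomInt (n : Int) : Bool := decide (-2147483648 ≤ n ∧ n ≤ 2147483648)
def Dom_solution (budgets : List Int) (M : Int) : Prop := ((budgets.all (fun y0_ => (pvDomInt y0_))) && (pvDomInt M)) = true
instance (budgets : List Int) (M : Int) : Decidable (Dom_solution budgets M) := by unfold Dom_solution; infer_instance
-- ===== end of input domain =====

-- B replaces A's binary search by a single accumulating pass over the sorted list (simpler).
-- Both Pythons sort `budgets` in place; the equivalence proved here is about the return value
-- (the in-place sort side effect is identical in A and B).

-- ===== PORT A =====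
-- A's binary-search while-loop; fuel makes the recursion total (the gap rt-lt shrinks every
-- iteration, so fuel = length is always sufficient in the reachable states).
def solutionLoop (s : List Int) (M : Int) (n : Nat) : Nat → Nat → Nat → Int
  | 0, _, _ => 0  -- fuel exhausted: unreachable under Pre_solution
  | fuel+1, lt, rt =>
    if rt - lt ≠ 1 then
      let mid := (lt + rt) / 2
      -- sum(budgets[:mid]) + budgets[mid]*(length-mid); s.getD mid 0 is exact: 0 ≤ mid < n here
      let v := (s.take mid).sum + s.getD mid 0 * ((n : Int) - (mid : Int))
      if v < M then solutionLoop s M n fuel mid rt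
      else if v > M then solutionLoop s M n fuel lt mid
      else s.getD mid 0
    else
      -- M -= sum(budgets[:rt]); return M // (length - rt)
      PySem.Int.floordiv (M - (s.take rt).sum) ((n : Int) - (rt : Int))

def solution (budgets : List Int) (M : Int) : Int :=
  let s := PySem.List.sorted budgets (fun x => x) false
  -- budgets[0] raises IndexError on []: excluded by Pre_solution
  if ((PySem.List.pyGet? s 0).getD 0) * (s.length : Int) > M then
    PySem.Int.floordiv M (s.length : Int)
  else if s.sum ≤ M then
    (PySem.List.max? s (fun x => x)).getD 0
  else
    solutionLoop s M s.length s.length 0 (s.length - 1)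

-- ===== PORT B =====
-- one pass over the sorted list: total = remaining budget, rem = number of requests left
def solutionAltLoop (total : Int) (rem : Nat) : List Int → Option Int
  | [] => none
  | b :: bs =>
    if b * (rem : Int) > total then some (PySem.Int.floordiv total (rem : Int))
    else solutionAltLoop (total - b) (rem - 1) bs

def solution_alt (budgets : List Int) (M : Int) : Int :=
  let s := PySem.List.sorted budgets (fun x => x) false
  match solutionAltLoop M s.length s with
  | some r => r
  | none => (PySem.List.pyGet? s (-1)).getD 0  -- budgets[-1]; IndexError on [] excluded by Pre_solution

-- ===== PRECONDITION & SPEC =====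
-- Pre_ excludes only the empty list, on which A raises IndexError at budgets[0] (B raises too).
def Pre_solution (budgets : List Int) (M : Int) : Prop := budgets ≠ []
instance (budgets : List Int) (M : Int) : Decidable (Pre_solution budgets M) := by
  unfold Pre_solution; infer_instance

def pvWitness_solution : List Int × Int := ([1, 3, 2, 5, 4], 9)

def Spec_solution (budgets : List Int) (M : Int) (out : Int) : Prop := out = solution_alt budgets M
instance (budgets : List Int) (M : Int) (out : Int) : Decidable (Spec_solution budgets M out) := by
  unfold Spec_solution; infer_instance

-- ===== CLAIM (what is proved, stated in full; the proofs are below) =====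
def Claim_equal_solution : Prop := ∀ (budgets : List Int) (M : Int), Dom_solution budgets M → Pre_solution budgets M → Spec_solution budgets M (solution budgets M)

-- ===== LEMMAS AND PROOFS =====

-- prefix sum sum(s[:i]) and the over-spend test value f(i) = sum(s[:i]) + s[i]*(n-i)
def preS (s : List Int) (i : Nat) : Int := (s.take i).sum
def fS (s : List Int) (i : Nat) : Int :=
  preS s i + s.getD i 0 * ((s.length : Int) - (i : Int))
-- B's loop state viewed from position j
def AL (s : List Int) (M : Int) (j : Nat) : Option Int :=
  solutionAltLoop (M - preS s j) (s.length - j) (s.drop j)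

theorem preS_succ (s : List Int) (j : Nat) (hj : j < s.length) :
    preS s (j + 1) = preS s j + s.getD j 0 := by
  have h : s.take (j + 1) = s.take j ++ [s[j]] := by
    rw [List.take_add_one, List.getElem?_eq_getElem hj]; rfl
  have hgd : s.getD j 0 = s[j] := List.getD_eq_getElem s 0 hj
  unfold preS
  rw [h, List.sum_append, hgd]
  simp

theorem fS_step (s : List Int) (j : Nat) (hj : j + 1 < s.length) :
    fS s (j + 1) - fS s j = (s.getD (j + 1) 0 - s.getD j 0) * ((s.length : Int) - j - 1) := by
  have h := preS_succ s j (by omega)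
  simp only [fS, h]
  push_cast
  ring

-- monotonicity of fS on a sorted list
theorem fS_mono (s : List Int)
    (hmono : ∀ p q : Nat, p ≤ q → q < s.length → s.getD p 0 ≤ s.getD q 0)
    (i j : Nat) (hij : i ≤ j) (hj : j < s.length) : fS s i ≤ fS s j := by
  induction j with
  | zero =>
    have : i = 0 := by omega
    simp [this]
  | succ k ih =>
    rcases Nat.lt_or_ge i (k + 1) with hlt | hge
    · have hk : k < s.length := by omega
      have h1 : fS s i ≤ fS s k := ih (by omega) hk
      have h2 : fS s (k + 1) - fS s k =
          (s.getD (k + 1) 0 - s.getD k 0) * ((s.length : Int) - k - 1) := fS_step s k hj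
      have h3 : s.getD k 0 ≤ s.getD (k + 1) 0 := hmono k (k + 1) (by omega) hj
      have h4 : (0 : Int) ≤ (s.length : Int) - k - 1 := by
        have : (k : Int) + 1 < (s.length : Int) := by exact_mod_cast hj
        omega
      nlinarith
    · have : i = k + 1 := by omega
      simp [this]

theorem fS_zero (s : List Int) : fS s 0 = s.getD 0 0 * (s.length : Int) := by
  simp [fS, preS]

theorem fS_last (s : List Int) (hs : s ≠ []) : fS s (s.length - 1) = s.sum := by
  have hlen : 0 < s.length := List.length_pos_iff.mpr hs
  have h := preS_succ s (s.length - 1) (by omega)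
  have h1 : s.length - 1 + 1 = s.length := by omega
  have h2 : preS s s.length = s.sum := by simp [preS]
  rw [h1, h2] at h
  have hc : ((s.length : Int) - ((s.length - 1 : Nat) : Int)) = 1 := by
    push_cast [h1]; omega
  simp only [fS, hc]
  omega

theorem AL_len (s : List Int) (M : Int) : AL s M s.length = none := by
  simp [AL, solutionAltLoop]

-- L1: if f j ≤ M the pass does not fire at j and moves on
theorem AL_skip (s : List Int) (M : Int) (j : Nat) (hj : j < s.length)
    (hle : fS s j ≤ M) : AL s M j = AL s M (j + 1) := by
  have hd : s.drop j = s[j] :: s.drop (j + 1) := List.drop_eq_getElem_cons hj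
  have hgd : s.getD j 0 = s[j] := by simp [List.getD, List.getElem?_eq_getElem hj]
  have hcast : (((s.length - j : Nat)) : Int) = (s.length : Int) - (j : Int) := by
    omega
  have hcond : ¬ s[j] * (((s.length - j : Nat)) : Int) > M - preS s j := by
    rw [hcast]
    have := hle
    simp only [fS, hgd] at this
    omega
  simp only [AL, hd, solutionAltLoop, if_neg hcond]
  rw [preS_succ s j hj, hgd]
  have : s.length - j - 1 = s.length - (j + 1) := by omega
  rw [this]
  ring_nf

-- L2: if f j > M the pass fires at j
theorem AL_fire (s : List Int) (M : Int) (j : Nat) (hj : j < s.length)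
    (hgt : fS s j > M) :
    AL s M j = some (PySem.Int.floordiv (M - preS s j) ((s.length : Int) - (j : Int))) := by
  have hd : s.drop j = s[j] :: s.drop (j + 1) := List.drop_eq_getElem_cons hj
  have hgd : s.getD j 0 = s[j] := by simp [List.getD, List.getElem?_eq_getElem hj]
  have hcast : (((s.length - j : Nat)) : Int) = (s.length : Int) - (j : Int) := by
    omega
  have hcond : s[j] * ((s.length : Int) - (j : Int)) > M - preS s j := by
    simp only [fS, hgd] at hgt
    omega
  simp only [AL, hd, solutionAltLoop, hcast, if_pos hcond]

-- L3: the pass skips every index below j' on which f ≤ M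
theorem AL_skip_range (s : List Int) (M : Int) :
    ∀ (j' j : Nat), j ≤ j' → j' ≤ s.length →
      (∀ i, j ≤ i → i < j' → fS s i ≤ M) → AL s M j = AL s M j' := by
  intro j' j hjj' hj' hall
  induction j' with
  | zero => have : j = 0 := by omega
            simp [this]
  | succ k ih =>
    rcases Nat.lt_or_ge j (k + 1) with hlt | hge
    · have h1 : AL s M j = AL s M k :=
        ih (by omega) (by omega) (fun i h1 h2 => hall i h1 (by omega))
      have h2 : AL s M k = AL s M (k + 1) :=
        AL_skip s M k (by omega) (hall k (by omega) (by omega))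
      rw [h1, h2]
    · have : j = k + 1 := by omega
      simp [this]

-- equality case: if f j = M exactly, the pass eventually returns s[j]
theorem AL_eq_case (s : List Int) (M : Int)
    (hmono : ∀ p q : Nat, p ≤ q → q < s.length → s.getD p 0 ≤ s.getD q 0)
    (r : Nat) (hr : r < s.length) (hfr : fS s r > M) :
    ∀ (d j : Nat), j < s.length → fS s j = M → s.length - j ≤ d →
      AL s M j = some (s.getD j 0) := by
  intro d
  induction d with
  | zero => intro j hj _ hd; omega
  | succ d ih =>
    intro j hj hfj hd
    have hjr : j < r := by
      by_contra hc
      have : fS s r ≤ fS s j := fS_mono s hmono r j (by omega) hj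
      omega
    have hj1 : j + 1 < s.length := by omega
    have hskip : AL s M j = AL s M (j + 1) := AL_skip s M j hj (by omega)
    rcases lt_or_ge M (fS s (j + 1)) with hgt | hle
    · -- fires at j+1; exact division gives s[j]
      have hfire := AL_fire s M (j + 1) hj1 hgt
      have hps : preS s (j + 1) = preS s j + s.getD j 0 := preS_succ s j (by omega)
      have hM : M = preS s j + s.getD j 0 * ((s.length : Int) - (j : Int)) := hfj.symm
      have hnum : M - preS s (j + 1) = s.getD j 0 * ((s.length : Int) - ((j + 1 : Nat) : Int)) := by
        rw [hps, hM]; push_cast; ring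
      have hpos : (0 : Int) < (s.length : Int) - ((j + 1 : Nat) : Int) := by
        have : ((j + 1 : Nat) : Int) < (s.length : Int) := by exact_mod_cast hj1
        omega
      have hdiv : PySem.Int.floordiv (M - preS s (j + 1)) ((s.length : Int) - ((j + 1 : Nat) : Int))
          = s.getD j 0 := by
        rw [hnum, PySem.Int.floordiv_eq_ediv_of_pos hpos]
        exact Int.mul_ediv_cancel _ (by omega)
      rw [hskip, hfire, hdiv]
    · -- f(j+1) = M again, and s[j+1] = s[j]: recurse
      have hmon : fS s j ≤ fS s (j + 1) := fS_mono s hmono j (j + 1) (by omega) hj1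
      have hfj1 : fS s (j + 1) = M := by omega
      have hstep := fS_step s j hj1
      have hpos : (0 : Int) < (s.length : Int) - (j : Int) - 1 := by
        have : ((j + 1 : Nat) : Int) < (s.length : Int) := by exact_mod_cast hj1
        push_cast at this ⊢; omega
      have hle' : s.getD j 0 ≤ s.getD (j + 1) 0 := hmono j (j + 1) (by omega) hj1
      have heq : s.getD (j + 1) 0 = s.getD j 0 := by
        rw [hfj1, hfj] at hstep
        nlinarith
      have := ih (j + 1) hj1 hfj1 (by omega)
      rw [hskip, this, heq]

-- A's binary search returns exactly the value B's pass produces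
theorem solutionLoop_spec (s : List Int) (M : Int)
    (hmono : ∀ p q : Nat, p ≤ q → q < s.length → s.getD p 0 ≤ s.getD q 0) :
    ∀ (fuel lt rt : Nat), lt < rt → rt < s.length → fS s lt ≤ M → fS s rt > M →
      rt - lt ≤ fuel →
      solutionAltLoop M s.length s = some (solutionLoop s M s.length fuel lt rt) := by
  intro fuel
  induction fuel with
  | zero => intro lt rt h1 _ _ _ h5; omega
  | succ fuel ih =>
    intro lt rt hlr hrn hflt hfrt hfuel
    have hAL : solutionAltLoop M s.length s = AL s M 0 := by
      simp [AL, preS]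
    by_cases hexit : rt - lt = 1
    · -- exit: rt is the first over-spend index
      have hall : ∀ i, 0 ≤ i → i < rt → fS s i ≤ M := by
        intro i _ hi
        have : fS s i ≤ fS s lt := fS_mono s hmono i lt (by omega) (by omega)
        omega
      have h1 : AL s M 0 = AL s M rt := AL_skip_range s M rt 0 (by omega) (by omega) hall
      have h2 := AL_fire s M rt hrn hfrt
      rw [hAL, h1, h2]
      simp only [solutionLoop]
      rw [if_neg (show ¬ rt - lt ≠ 1 by omega)]
      rfl
    · simp only [solutionLoop]
      rw [if_pos (show rt - lt ≠ 1 from hexit)]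
      set mid := (lt + rt) / 2 with hmid
      have hlm : lt < mid := by omega
      have hmr : mid < rt := by omega
      have hv : (s.take mid).sum + s.getD mid 0 * ((s.length : Int) - (mid : Int)) = fS s mid := rfl
      rw [hv]
      by_cases hc1 : fS s mid < M
      · rw [if_pos hc1]
        exact ih mid rt hmr hrn (by omega) hfrt (by omega)
      · rw [if_neg hc1]
        by_cases hc2 : fS s mid > M
        · rw [if_pos hc2]
          exact ih lt mid hlm (by omega) hflt hc2 (by omega)
        · rw [if_neg hc2]
          have hfm : fS s mid = M := by omega
          have hall : ∀ i, 0 ≤ i → i < mid → fS s i ≤ M := by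
            intro i _ hi
            have : fS s i ≤ fS s mid := fS_mono s hmono i mid (by omega) (by omega)
            omega
          have h1 : AL s M 0 = AL s M mid := AL_skip_range s M mid 0 (by omega) (by omega) hall
          have h2 := AL_eq_case s M hmono rt hrn hfrt (s.length) mid (by omega) hfm (by omega)
          rw [hAL, h1, h2]

-- on a sorted nonempty list the (first) maximum has the value of the last element
theorem sorted_max_getLast (s : List Int)
    (hmono : ∀ p q : Nat, p ≤ q → q < s.length → s.getD p 0 ≤ s.getD q 0)
    (hs : s ≠ []) :
    (PySem.List.max? s (fun x => x)).getD 0 = s.getLast hs := by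
  obtain ⟨m, hm⟩ : ∃ m, PySem.List.max? s (fun x => x) = some m := by
    rcases h : PySem.List.max? s (fun x => x) with _ | m
    · exact absurd ((PySem.List.max?_eq_none_iff _ _).mp h) hs
    · exact ⟨m, rfl⟩
  have hmmem : m ∈ s := PySem.List.max?_mem hm
  have hmax : ∀ y ∈ s, y ≤ m := by
    intro y hy; exact PySem.List.max?_isMax hm y hy
  have hlastmem : s.getLast hs ∈ s := List.getLast_mem hs
  have h1 : s.getLast hs ≤ m := hmax _ hlastmem
  have h2 : m ≤ s.getLast hs := by
    obtain ⟨p, hp, hpe⟩ := List.mem_iff_getElem.mp hmmem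
    have hlen : 0 < s.length := List.length_pos_iff.mpr hs
    have hgl : s.getLast hs = s[s.length - 1] := (List.getLast_eq_getElem hs)
    have h := hmono p (s.length - 1) (by omega) (by omega)
    rw [List.getD_eq_getElem s 0 hp,
      List.getD_eq_getElem s 0 (show s.length - 1 < s.length by omega)] at h
    rw [hgl, ← hpe]; exact h
  rw [hm]
  simp
  omega

theorem sorted_getD_mono (budgets : List Int) :
    ∀ p q : Nat, p ≤ q → q < (PySem.List.sorted budgets (fun x => x) false).length →
      (PySem.List.sorted budgets (fun x => x) false).getD p 0 ≤
      (PySem.List.sorted budgets (fun x => x) false).getD q 0 := by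
  intro p q hpq hq
  have h := PySem.List.sorted_id_getElem_mono budgets hpq hq
  rw [List.getD_eq_getElem _ 0 (show p < _ by omega), List.getD_eq_getElem _ 0 hq]
  exact h

theorem solution_aux (s : List Int) (M : Int)
    (hmono : ∀ p q : Nat, p ≤ q → q < s.length → s.getD p 0 ≤ s.getD q 0)
    (hs : s ≠ []) :
    (if ((PySem.List.pyGet? s 0).getD 0) * (s.length : Int) > M then
      PySem.Int.floordiv M (s.length : Int)
    else if s.sum ≤ M then
      (PySem.List.max? s (fun x => x)).getD 0
    else
      solutionLoop s M s.length s.length 0 (s.length - 1)) =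
    (match solutionAltLoop M s.length s with
      | some r => r
      | none => (PySem.List.pyGet? s (-1)).getD 0) := by
  have hlen : 0 < s.length := List.length_pos_iff.mpr hs
  have hAL0 : AL s M 0 = solutionAltLoop M s.length s := by simp [AL, preS]
  have hget0 : (PySem.List.pyGet? s 0).getD 0 = s.getD 0 0 := by
    obtain ⟨a, t, hat⟩ := List.exists_cons_of_ne_nil hs
    rw [hat, PySem.List.pyGet?_zero_cons]
    rfl
  by_cases h1 : ((PySem.List.pyGet? s 0).getD 0) * (s.length : Int) > M
  · -- branch 1: even the minimum request over-spends; B fires at index 0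
    rw [if_pos h1]
    have hf0 : fS s 0 > M := by rw [fS_zero, ← hget0]; omega
    have hfire := AL_fire s M 0 hlen hf0
    rw [hAL0] at hfire
    have hz : M - preS s 0 = M := by simp [preS]
    rw [hz] at hfire
    simp only [Nat.cast_zero, sub_zero] at hfire
    rw [hfire]
  · rw [if_neg h1]
    have hf0 : fS s 0 ≤ M := by rw [fS_zero, ← hget0]; omega
    by_cases h2 : s.sum ≤ M
    · -- branch 2: everything fits; B's pass never fires and returns the last element
      rw [if_pos h2]
      have hall : ∀ i, 0 ≤ i → i < s.length → fS s i ≤ M := by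
        intro i _ hi
        have h3 : fS s i ≤ fS s (s.length - 1) :=
          fS_mono s hmono i (s.length - 1) (by omega) (by omega)
        rw [fS_last s hs] at h3
        omega
      have hnone : solutionAltLoop M s.length s = none := by
        rw [← hAL0, AL_skip_range s M s.length 0 (by omega) (le_refl _) hall, AL_len]
      rw [hnone]
      rw [PySem.List.pyGet?_neg_one, List.getLast?_eq_getLast hs]
      exact sorted_max_getLast s hmono hs
    · -- branch 3: A's binary search; invariants f(0) ≤ M < f(n-1)
      rw [if_neg h2]
      have hfl : fS s (s.length - 1) > M := by rw [fS_last s hs]; omega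
      have hn2 : 2 ≤ s.length := by
        by_contra hc
        have h6 : s.length = 1 := by omega
        have h7 : fS s 0 > M := by
          have := hfl
          rw [h6] at this
          simpa [h6] using this
        omega
      have hspec := solutionLoop_spec s M hmono s.length 0 (s.length - 1)
        (by omega) (by omega) hf0 hfl (by omega)
      rw [hspec]

-- ===== VERDICT (by name: the statement is the Claim_ definition above) =====
theorem solution_spec : Claim_equal_solution := by
  intro budgets M _hdom hpre
  unfold Spec_solution
  show solution budgets M = solution_alt budgets M
  have hmono := sorted_getD_mono budgets
  have hs : PySem.List.sorted budgets (fun x => x) false ≠ [] := by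
    rw [Ne, PySem.List.sorted_eq_nil_iff]; exact hpre
  exact solution_aux (PySem.List.sorted budgets (fun x => x) false) M hmono hs
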